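-- pv_equiv track=rewrite | github.com/HaigBishop/extract16s | Scripts/asvs2truncspec_03_agg.py | snap_to_mapped_position
-- ===== SOURCE A (Python) =====
-- def snap_to_mapped_position(model_pos, mapping, direction, max_model_pos):
--     """Find nearest mapped model position by snapping in a direction.
--
--     direction: 'forward' (for start) or 'backward' (for end)
--     Returns ref_pos or None if no mapping found.
--     """
--     if direction == 'forward':
--         # search forward from model_pos
--         for pos in range(model_pos, max_model_pos + 1):
--             if pos in mapping:
--                 return mapping[pos]
--     else:  # backward
--         # search backward from model_pos
--         for pos in range(model_pos, 0, -1):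
--             if pos in mapping:
--                 return mapping[pos]
--
--     return None
-- ===== SOURCE B (Python) =====
-- def snap_to_mapped_position(model_pos, mapping, direction, max_model_pos):
--     """Find nearest mapped model position by filtering the mapping's keys
--     to the relevant interval and taking the extremum (no range scan)."""
--     if direction == 'forward':
--         keys = [p for p in mapping if model_pos <= p <= max_model_pos]
--         return mapping[min(keys)] if keys else None
--     keys = [p for p in mapping if 1 <= p <= model_pos]
--     return mapping[max(keys)] if keys else None
-- ===== Notes on version B (the rewrite author's own statement) =====
-- stated objective: alternative
-- what changed: B filters the mapping's keys to the search interval and returns the value at the min (forward) / max (backward) key instead of probing every integer position in the range.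
import Mathlib
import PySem

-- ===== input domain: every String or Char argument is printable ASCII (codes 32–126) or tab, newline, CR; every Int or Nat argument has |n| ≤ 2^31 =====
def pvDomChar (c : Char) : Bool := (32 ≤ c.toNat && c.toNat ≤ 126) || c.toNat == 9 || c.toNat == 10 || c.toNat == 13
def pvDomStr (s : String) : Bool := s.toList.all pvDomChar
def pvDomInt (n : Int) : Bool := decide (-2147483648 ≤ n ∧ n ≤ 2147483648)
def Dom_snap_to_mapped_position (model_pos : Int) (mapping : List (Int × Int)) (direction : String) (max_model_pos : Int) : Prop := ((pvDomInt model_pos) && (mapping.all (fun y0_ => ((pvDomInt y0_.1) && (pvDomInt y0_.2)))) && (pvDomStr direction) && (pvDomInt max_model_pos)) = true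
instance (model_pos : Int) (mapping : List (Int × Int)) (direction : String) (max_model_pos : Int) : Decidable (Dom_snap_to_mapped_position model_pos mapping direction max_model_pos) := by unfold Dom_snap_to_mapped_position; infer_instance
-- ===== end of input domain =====

-- B replaces A's integer-range scan by filtering the mapping's keys to the interval and taking the extremal key (alternative decomposition).

-- ===== PORT A =====
-- Python dict lookup on the association list: value of the first pair whose key is p, none if absent.
def pvDGet : List (Int × Int) → Int → Option Int
  | [], _ => none
  | (k, v) :: rest, p => if k = p then some v else pvDGet rest p

-- 'for pos in range(model_pos, max_model_pos + 1): if pos in mapping: return mapping[pos]'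
def pvScanFwd (mapping : List (Int × Int)) (pos stop : Int) : Option Int :=
  if h : pos < stop then
    match pvDGet mapping pos with
    | some v => some v
    | none => pvScanFwd mapping (pos + 1) stop
  else none
termination_by (stop - pos).toNat
decreasing_by omega

-- 'for pos in range(model_pos, 0, -1): if pos in mapping: return mapping[pos]'
def pvScanBwd (mapping : List (Int × Int)) (pos : Int) : Option Int :=
  if h : 0 < pos then
    match pvDGet mapping pos with
    | some v => some v
    | none => pvScanBwd mapping (pos - 1)
  else none
termination_by pos.toNat
decreasing_by omega

def snap_to_mapped_position (model_pos : Int) (mapping : List (Int × Int)) (direction : String) (max_model_pos : Int) : Option Int :=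
  if direction == "forward" then
    pvScanFwd mapping model_pos (max_model_pos + 1)
  else
    pvScanBwd mapping model_pos

-- ===== PORT B =====
def snap_to_mapped_position_alt (model_pos : Int) (mapping : List (Int × Int)) (direction : String) (max_model_pos : Int) : Option Int :=
  if direction == "forward" then
    let keys := (mapping.map Prod.fst).filter (fun p => model_pos ≤ p && p ≤ max_model_pos)
    match PySem.List.min? keys (fun x => x) with
    | some m => pvDGet mapping m
    | none => none
  else
    let keys := (mapping.map Prod.fst).filter (fun p => 1 ≤ p && p ≤ model_pos)
    match PySem.List.max? keys (fun x => x) with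
    | some m => pvDGet mapping m
    | none => none

-- ===== PRECONDITION & SPEC =====
def Spec_snap_to_mapped_position (model_pos : Int) (mapping : List (Int × Int)) (direction : String) (max_model_pos : Int) (out : Option Int) : Prop := out = snap_to_mapped_position_alt model_pos mapping direction max_model_pos
instance (model_pos : Int) (mapping : List (Int × Int)) (direction : String) (max_model_pos : Int) (out : Option Int) : Decidable (Spec_snap_to_mapped_position model_pos mapping direction max_model_pos out) := by unfold Spec_snap_to_mapped_position; infer_instance

-- ===== CLAIM (what is proved, stated in full; the proofs are below) =====
def Claim_equal_snap_to_mapped_position : Prop := ∀ (model_pos : Int) (mapping : List (Int × Int)) (direction : String) (max_model_pos : Int), Dom_snap_to_mapped_position model_pos mapping direction max_model_pos → Spec_snap_to_mapped_position model_pos mapping direction max_model_pos (snap_to_mapped_position model_pos mapping direction max_model_pos)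

-- ===== LEMMAS AND PROOFS =====

theorem pvDGet_eq_none_iff (m : List (Int × Int)) (p : Int) :
    pvDGet m p = none ↔ p ∉ m.map Prod.fst := by
  induction m with
  | nil => simp [pvDGet]
  | cons kv rest ih =>
    obtain ⟨k, v⟩ := kv
    by_cases h : k = p
    · subst h; simp [pvDGet]
    · rw [pvDGet, if_neg h, ih]
      simp only [List.map_cons, List.mem_cons, not_or]
      constructor
      · intro hn; exact ⟨fun e => h e.symm, hn⟩
      · rintro ⟨_, hn⟩; exact hn

theorem pvScanFwd_eq (mapping : List (Int × Int)) (pos stop : Int) :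
    pvScanFwd mapping pos stop =
      (match PySem.List.min? ((mapping.map Prod.fst).filter (fun p => pos ≤ p && p < stop)) (fun x => x) with
       | some m => pvDGet mapping m
       | none => none) := by
  generalize hfuel : (stop - pos).toNat = n
  induction n generalizing pos with
  | zero =>
    have h : ¬ pos < stop := by omega
    rw [pvScanFwd, dif_neg h]
    have hnil : (mapping.map Prod.fst).filter (fun p => pos ≤ p && p < stop) = [] := by
      apply List.filter_eq_nil_iff.2
      intro p _
      simp only [Bool.and_eq_true, decide_eq_true_eq, not_and]
      omega
    rw [hnil, (PySem.List.min?_eq_none_iff _ _).2 rfl]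
  | succ n ih =>
    have h : pos < stop := by omega
    rw [pvScanFwd, dif_pos h]
    rcases hg : pvDGet mapping pos with _ | v
    · have hpk := (pvDGet_eq_none_iff mapping pos).1 hg
      have hfilt : (mapping.map Prod.fst).filter (fun p => pos ≤ p && p < stop)
          = (mapping.map Prod.fst).filter (fun p => pos + 1 ≤ p && p < stop) := by
        apply List.filter_congr
        intro p hp
        have hne : p ≠ pos := fun e => hpk (e ▸ hp)
        congr 1
        rw [decide_eq_decide]
        omega
      rw [ih (pos + 1) (by omega), hfilt]
    · have hmem : pos ∈ (mapping.map Prod.fst).filter (fun p => pos ≤ p && p < stop) := by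
        apply List.mem_filter.2
        refine ⟨?_, by simp [h]⟩
        by_contra hn
        rw [(pvDGet_eq_none_iff mapping pos).2 hn] at hg
        simp at hg
      rcases hmin : PySem.List.min? ((mapping.map Prod.fst).filter (fun p => pos ≤ p && p < stop)) (fun x => x) with _ | m
      · rw [(PySem.List.min?_eq_none_iff _ _).1 hmin] at hmem
        exact absurd hmem (List.not_mem_nil)
      · have hm := PySem.List.min?_mem hmin
        have hle : m ≤ pos := PySem.List.min?_isMin hmin pos hmem
        have hge : pos ≤ m := by
          have := (List.mem_filter.1 hm).2
          simp only [Bool.and_eq_true, decide_eq_true_eq] at this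
          exact this.1
        have hmp : m = pos := le_antisymm hle hge
        simp [hmp, hg]

theorem pvScanBwd_eq (mapping : List (Int × Int)) (pos : Int) :
    pvScanBwd mapping pos =
      (match PySem.List.max? ((mapping.map Prod.fst).filter (fun p => 1 ≤ p && p ≤ pos)) (fun x => x) with
       | some m => pvDGet mapping m
       | none => none) := by
  generalize hfuel : pos.toNat = n
  induction n generalizing pos with
  | zero =>
    have h : ¬ 0 < pos := by omega
    rw [pvScanBwd, dif_neg h]
    have hnil : (mapping.map Prod.fst).filter (fun p => 1 ≤ p && p ≤ pos) = [] := by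
      apply List.filter_eq_nil_iff.2
      intro p _
      simp only [Bool.and_eq_true, decide_eq_true_eq, not_and]
      omega
    rw [hnil, (PySem.List.max?_eq_none_iff _ _).2 rfl]
  | succ n ih =>
    have h : 0 < pos := by omega
    rw [pvScanBwd, dif_pos h]
    rcases hg : pvDGet mapping pos with _ | v
    · have hpk := (pvDGet_eq_none_iff mapping pos).1 hg
      have hfilt : (mapping.map Prod.fst).filter (fun p => 1 ≤ p && p ≤ pos)
          = (mapping.map Prod.fst).filter (fun p => 1 ≤ p && p ≤ pos - 1) := by
        apply List.filter_congr
        intro p hp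
        have hne : p ≠ pos := fun e => hpk (e ▸ hp)
        congr 1
        rw [decide_eq_decide]
        omega
      rw [ih (pos - 1) (by omega), hfilt]
    · have hmem : pos ∈ (mapping.map Prod.fst).filter (fun p => 1 ≤ p && p ≤ pos) := by
        apply List.mem_filter.2
        refine ⟨?_, by simp; omega⟩
        by_contra hn
        rw [(pvDGet_eq_none_iff mapping pos).2 hn] at hg
        simp at hg
      rcases hmax : PySem.List.max? ((mapping.map Prod.fst).filter (fun p => 1 ≤ p && p ≤ pos)) (fun x => x) with _ | m
      · rw [(PySem.List.max?_eq_none_iff _ _).1 hmax] at hmem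
        exact absurd hmem (List.not_mem_nil)
      · have hm := PySem.List.max?_mem hmax
        have hge : pos ≤ m := PySem.List.max?_isMax hmax pos hmem
        have hle : m ≤ pos := by
          have := (List.mem_filter.1 hm).2
          simp only [Bool.and_eq_true, decide_eq_true_eq] at this
          exact this.2
        have hmp : m = pos := le_antisymm hle hge
        simp [hmax, hmp, hg]

-- ===== VERDICT (by name: the statement is the Claim_ definition above) =====
theorem snap_to_mapped_position_spec : Claim_equal_snap_to_mapped_position := by
  intro model_pos mapping direction max_model_pos _
  unfold Spec_snap_to_mapped_position snap_to_mapped_position snap_to_mapped_position_alt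
  by_cases hd : direction == "forward"
  · rw [if_pos hd, if_pos hd, pvScanFwd_eq]
    have hfilt : (mapping.map Prod.fst).filter (fun p => model_pos ≤ p && p < max_model_pos + 1)
        = (mapping.map Prod.fst).filter (fun p => model_pos ≤ p && p ≤ max_model_pos) := by
      apply List.filter_congr
      intro p _
      congr 1
      rw [decide_eq_decide]
      omega
    rw [hfilt]
  · rw [if_neg hd, if_neg hd, pvScanBwd_eq]
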